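-- pv_equiv track=rewrite | github.com/rnaksdl/IR-See | scripts/401_guess_angle.py | group_ambiguous_repeats_consecutively
-- ===== SOURCE A (Python) =====
-- def collapse_repeats(pin):
--     if not pin: return pin
--     out = [pin[0]]
--     for ch in pin[1:]:
--         if ch != out[-1]: out.append(ch)
--     return ''.join(out)
--
-- def group_ambiguous_repeats_consecutively(pin_scores):
--     groups, order = {}, []
--     for pin, score in pin_scores:
--         key = collapse_repeats(pin)
--         if key not in groups:
--             groups[key] = []; order.append(key)
--         groups[key].append((pin, score))
--     for k in groups: groups[k].sort(key=lambda x: x[1])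
--     out = []
--     for k in order: out.extend(groups[k])
--     return out
-- ===== SOURCE B (Python) =====
-- def collapse_repeats(pin):
--     if not pin: return pin
--     out = [pin[0]]
--     for ch in pin[1:]:
--         if ch != out[-1]: out.append(ch)
--     return ''.join(out)
--
-- def group_ambiguous_repeats_consecutively(pin_scores):
--     groups = {}
--     for ps in sorted(pin_scores, key=lambda x: x[1]):
--         groups.setdefault(collapse_repeats(ps[0]), []).append(ps)
--     out = []
--     for k in dict.fromkeys(collapse_repeats(pin) for pin, _ in pin_scores):
--         out.extend(groups[k])
--     return out
-- ===== Notes on version B (the rewrite author's own statement) =====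
-- stated objective: alternative
-- what changed: B sorts the whole list by score once up front and then groups the already-sorted elements (setdefault dict), emitting groups in dedup order of the collapsed keys, instead of A's group-first-then-sort-each-group with an explicit order list; stability of sorted makes the per-group orders coincide.
import Mathlib
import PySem

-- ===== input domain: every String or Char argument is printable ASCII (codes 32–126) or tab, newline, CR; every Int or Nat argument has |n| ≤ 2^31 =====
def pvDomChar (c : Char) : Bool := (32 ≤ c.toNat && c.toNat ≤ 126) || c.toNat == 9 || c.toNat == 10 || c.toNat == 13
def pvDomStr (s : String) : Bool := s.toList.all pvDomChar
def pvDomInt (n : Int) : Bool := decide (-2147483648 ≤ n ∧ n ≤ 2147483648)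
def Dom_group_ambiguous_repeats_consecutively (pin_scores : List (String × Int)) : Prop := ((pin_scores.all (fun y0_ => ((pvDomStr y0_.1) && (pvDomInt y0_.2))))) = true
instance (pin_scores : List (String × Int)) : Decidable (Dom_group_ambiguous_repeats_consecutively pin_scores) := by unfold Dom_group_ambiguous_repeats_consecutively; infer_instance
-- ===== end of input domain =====

-- B sorts the whole list by score ONCE and then groups the already-sorted elements,
-- emitting groups in dedup order of the collapsed keys (objective: alternative; A sorts
-- each group separately after grouping).

-- ===== PORT A =====
-- collapse_repeats, shared helper of both Pythons (identical source in Source A and Source B)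
def collapseRepeats (pin : String) : String :=
  match pin.toList with
  | [] => pin
  | c :: rest =>
    String.ofList (rest.foldl (fun out ch => if ch ≠ out.getLast! then out ++ [ch] else out) [c])

-- body of A's first loop: ensure the key is present (also recording it in `order`), then append
def pvStepA (st : PySem.Dict String (List (String × Int)) × List String) (p : String × Int) :
    PySem.Dict String (List (String × Int)) × List String :=
  let key := collapseRepeats p.1
  let st' := if st.1.contains key then st else (st.1.insert key [], st.2 ++ [key])
  (st'.1.modify key [] (fun l => l ++ [p]), st'.2)

def group_ambiguous_repeats_consecutively (pin_scores : List (String × Int)) : List (String × Int) :=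
  let st := pin_scores.foldl pvStepA (PySem.Dict.empty, [])
  let groups := st.1
  let order := st.2
  let groups := groups.keys.foldl
    (fun g k => g.modify k [] (fun l => PySem.List.sorted l (fun x => x.2) false)) groups
  order.foldl (fun out k => out ++ groups.getD k []) []

-- ===== PORT B =====
-- body of B's grouping loop: groups.setdefault(key, []).append(ps), i.e. d[key] = d.get(key, []) + [ps]
def pvStepB (g : PySem.Dict String (List (String × Int))) (ps : String × Int) :
    PySem.Dict String (List (String × Int)) :=
  g.modify (collapseRepeats ps.1) [] (fun l => l ++ [ps])

def group_ambiguous_repeats_consecutively_alt (pin_scores : List (String × Int)) : List (String × Int) :=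
  let groups := (PySem.List.sorted pin_scores (fun x => x.2) false).foldl pvStepB PySem.Dict.empty
  -- groups[k] : k always present (it comes from pin_scores itself), so getD is exact
  (PySem.List.dedup (pin_scores.map (fun p => collapseRepeats p.1))).foldl
    (fun out k => out ++ groups.getD k []) []

-- ===== PRECONDITION & SPEC =====
def Spec_group_ambiguous_repeats_consecutively (pin_scores : List (String × Int)) (out : List (String × Int)) : Prop := out = group_ambiguous_repeats_consecutively_alt pin_scores
instance (pin_scores : List (String × Int)) (out : List (String × Int)) : Decidable (Spec_group_ambiguous_repeats_consecutively pin_scores out) := by unfold Spec_group_ambiguous_repeats_consecutively; infer_instance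

-- ===== CLAIM (what is proved, stated in full; the proofs are below) =====
def Claim_equal_group_ambiguous_repeats_consecutively : Prop := ∀ (pin_scores : List (String × Int)), Dom_group_ambiguous_repeats_consecutively pin_scores → Spec_group_ambiguous_repeats_consecutively pin_scores (group_ambiguous_repeats_consecutively pin_scores)

-- ===== LEMMAS AND PROOFS =====

-- A's grouping dict evolves independently of `order`: its value is this single-accumulator fold
def pvStep1 (d : PySem.Dict String (List (String × Int))) (p : String × Int) :
    PySem.Dict String (List (String × Int)) :=
  let key := collapseRepeats p.1
  (if d.contains key then d else d.insert key []).modify key [] (fun l => l ++ [p])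

lemma foldA_fst : ∀ (xs : List (String × Int)) d o,
    (xs.foldl pvStepA (d, o)).1 = xs.foldl pvStep1 d := by
  intro xs
  induction xs with
  | nil => intro d o; rfl
  | cons p xs ih =>
    intro d o
    simp only [List.foldl_cons]
    by_cases h : d.contains (collapseRepeats p.1) <;>
      simp [pvStepA, pvStep1, h, ih]

lemma foldA_snd_keys : ∀ (xs : List (String × Int)) d,
    (xs.foldl pvStepA (d, d.keys)).2 = (xs.foldl pvStepA (d, d.keys)).1.keys := by
  intro xs
  induction xs with
  | nil => intro d; rfl
  | cons p xs ih =>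
    intro d
    simp only [List.foldl_cons]
    by_cases h : d.contains (collapseRepeats p.1)
    · have hstep : pvStepA (d, d.keys) p
          = (d.modify (collapseRepeats p.1) [] (fun l => l ++ [p]), d.keys) := by
        simp [pvStepA, h]
      have hk : (d.modify (collapseRepeats p.1) [] (fun l => l ++ [p])).keys = d.keys := by
        simp [PySem.Dict.keys_modify, PySem.Dict.keys_insert_of_contains, h]
      rw [hstep, ← hk]
      exact ih _
    · have hstep : pvStepA (d, d.keys) p
          = ((d.insert (collapseRepeats p.1) []).modify (collapseRepeats p.1) [] (fun l => l ++ [p]),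
             d.keys ++ [collapseRepeats p.1]) := by
        simp [pvStepA, h]
      have hf : d.contains (collapseRepeats p.1) = false := by simpa using h
      have hk : ((d.insert (collapseRepeats p.1) []).modify (collapseRepeats p.1) [] (fun l => l ++ [p])).keys
          = d.keys ++ [collapseRepeats p.1] := by
        simp [PySem.Dict.keys_modify, PySem.Dict.insert_insert_self,
          PySem.Dict.keys_insert_of_not_contains, hf]
      rw [hstep, ← hk]
      exact ih _

lemma foldA_getD : ∀ (xs : List (String × Int)) d (k : String),
    (xs.foldl pvStep1 d).getD k [] =
      d.getD k [] ++ xs.filter (fun p => collapseRepeats p.1 == k) := by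
  intro xs
  induction xs with
  | nil => intro d k; simp
  | cons p xs ih =>
    intro d k
    have hstep : (pvStep1 d p).getD k []
        = d.getD k [] ++ (if (collapseRepeats p.1 == k) then [p] else []) := by
      by_cases h : d.contains (collapseRepeats p.1)
      · simp only [pvStep1, h, if_true]
        rw [PySem.Dict.getD_modify]
        by_cases he : k = collapseRepeats p.1
        · simp [he]
        · simp [he, Ne.symm he]
      · have hf : d.contains (collapseRepeats p.1) = false := by simpa using h
        simp only [pvStep1, hf, if_false, Bool.false_eq_true]
        rw [PySem.Dict.getD_modify]
        by_cases he : k = collapseRepeats p.1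
        · simp [he, PySem.Dict.getD_insert_self, PySem.Dict.getD_of_not_contains (h := hf)]
        · simp [he, Ne.symm he, PySem.Dict.getD_insert_of_ne]
    simp only [List.foldl_cons, ih, hstep, List.filter_cons]
    by_cases he : collapseRepeats p.1 == k <;> simp [he, List.append_assoc]

lemma foldA_keys : ∀ (xs : List (String × Int)) d,
    (xs.foldl pvStep1 d).keys =
      PySem.Set.update d.keys (xs.map (fun p => collapseRepeats p.1)) := by
  intro xs
  induction xs with
  | nil => intro d; simp [PySem.Set.update]
  | cons p xs ih =>
    intro d
    simp only [List.foldl_cons, List.map_cons, PySem.Set.update_cons, ih]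
    congr 1
    by_cases h : d.contains (collapseRepeats p.1)
    · have hm : collapseRepeats p.1 ∈ d.keys := (PySem.Dict.contains_iff_mem_keys _ _).mp h
      rw [PySem.Set.add_of_mem hm]
      simp [pvStep1, h, PySem.Dict.keys_modify, PySem.Dict.keys_insert_of_contains]
    · have hf : d.contains (collapseRepeats p.1) = false := by simpa using h
      have hm : collapseRepeats p.1 ∉ d.keys := fun hmem =>
        h ((PySem.Dict.contains_iff_mem_keys _ _).mpr hmem)
      rw [PySem.Set.add_of_not_mem hm]
      simp [pvStep1, hf, PySem.Dict.keys_modify, PySem.Dict.insert_insert_self,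
        PySem.Dict.keys_insert_of_not_contains]

-- the second loop of A, outside its key set
lemma sortLoop_getD_not_mem (ks : List String) (g : PySem.Dict String (List (String × Int)))
    (k : String) (hk : k ∉ ks) :
    (ks.foldl (fun g k => g.modify k [] (fun l => PySem.List.sorted l (fun x => x.2) false)) g).getD k []
      = g.getD k [] := by
  induction ks generalizing g with
  | nil => rfl
  | cons k0 ks ih =>
    simp only [List.mem_cons, not_or] at hk
    simp only [List.foldl_cons]
    rw [ih _ hk.2, PySem.Dict.getD_modify, if_neg hk.1]

-- the second loop of A sorts each entry in place
lemma sortLoop_getD (ks : List String) (g : PySem.Dict String (List (String × Int)))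
    (hnd : ks.Nodup) (k : String) (hk : k ∈ ks) :
    (ks.foldl (fun g k => g.modify k [] (fun l => PySem.List.sorted l (fun x => x.2) false)) g).getD k []
      = PySem.List.sorted (g.getD k []) (fun x => x.2) false := by
  induction ks generalizing g with
  | nil => simp at hk
  | cons k0 ks ih =>
    simp only [List.nodup_cons] at hnd
    simp only [List.foldl_cons]
    rcases List.mem_cons.mp hk with he | hm
    · subst he
      rw [sortLoop_getD_not_mem _ _ _ hnd.1, PySem.Dict.getD_modify, if_pos rfl]
    · have hne : k ≠ k0 := fun hh => hnd.1 (hh ▸ hm)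
      rw [ih _ hnd.2 hm, PySem.Dict.getD_modify, if_neg hne]

-- B-side: the grouping fold over any list accumulates, per key, exactly the filter
lemma foldB_getD : ∀ (l : List (String × Int)) (d : PySem.Dict String (List (String × Int))) (k : String),
    (l.foldl pvStepB d).getD k [] = d.getD k [] ++ l.filter (fun p => collapseRepeats p.1 == k) := by
  intro l
  induction l with
  | nil => intro d k; simp
  | cons p l ih =>
    intro d k
    have hstep : (pvStepB d p).getD k []
        = d.getD k [] ++ (if (collapseRepeats p.1 == k) then [p] else []) := by
      unfold pvStepB
      rw [PySem.Dict.getD_modify]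
      by_cases he : k = collapseRepeats p.1
      · simp [he]
      · simp [he, Ne.symm he]
    simp only [List.foldl_cons, ih, hstep, List.filter_cons]
    by_cases he : collapseRepeats p.1 == k <;> simp [he, List.append_assoc]

-- inserting an element strictly below everything in the list puts it in front
lemma insertBy_all_lt {α κ : Type} [LinearOrder κ] (key : α → κ) (x : α) (l : List α)
    (h : ∀ z ∈ l, key x < key z) :
    PySem.List.insertBy (fun a b => decide (key a < key b)) x l = x :: l := by
  cases l with
  | nil => rfl
  | cons y t => simp [PySem.List.insertBy, h y (List.mem_cons_self ..)]

-- filtering commutes with one stable insertion into an already key-ordered list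
lemma filter_insertBy {α κ : Type} [LinearOrder κ] (key : α → κ) (P : α → Bool) (x : α)
    (acc : List α) (h : acc.Pairwise (fun a b => key a ≤ key b)) :
    (PySem.List.insertBy (fun a b => decide (key a < key b)) x acc).filter P
      = if P x then PySem.List.insertBy (fun a b => decide (key a < key b)) x (acc.filter P)
        else acc.filter P := by
  induction acc with
  | nil => by_cases hp : P x <;> simp [PySem.List.insertBy, hp]
  | cons y t ih =>
    rw [List.pairwise_cons] at h
    by_cases hb : key x < key y
    · have hall : ∀ z ∈ (y :: t).filter P, key x < key z := by
        intro z hz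
        rcases List.mem_cons.mp (List.mem_of_mem_filter hz) with rfl | hzt
        · exact hb
        · exact lt_of_lt_of_le hb (h.1 z hzt)
      rw [show (PySem.List.insertBy (fun a b => decide (key a < key b)) x (y :: t)) = x :: y :: t
            by simp [PySem.List.insertBy, hb]]
      by_cases hp : P x
      · rw [if_pos hp, insertBy_all_lt key x _ hall]
        simp [List.filter_cons, hp]
      · rw [if_neg (by simp [hp])]
        simp [List.filter_cons, hp]
    · have ht := ih h.2
      by_cases hp : P x <;> by_cases hpy : P y <;>
        simp [PySem.List.insertBy, hb, hpy, hp, ht]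

-- filtering commutes with Python's stable sort
lemma filter_sorted {α κ : Type} [LinearOrder κ] (key : α → κ) (P : α → Bool) (xs : List α) :
    (PySem.List.sorted xs key false).filter P = PySem.List.sorted (xs.filter P) key false := by
  have hstep : ∀ (ys : List α) (x : α), PySem.List.sorted (ys ++ [x]) key false
      = PySem.List.insertBy (fun a b => decide (key a < key b)) x (PySem.List.sorted ys key false) := by
    intro ys x
    rw [PySem.List.sorted_eq_foldl_insertBy, PySem.List.sorted_eq_foldl_insertBy, List.foldl_append]
    rfl
  induction xs using List.reverseRecOn with
  | nil => rfl
  | append_singleton xs x ih =>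
    rw [hstep, filter_insertBy key P x _ (PySem.List.sorted_pairwise xs key), List.filter_append]
    by_cases hp : P x
    · simp [hp, hstep, ih]
    · simp [hp, ih]

-- ===== VERDICT (by name: the statement is the Claim_ definition above) =====
theorem group_ambiguous_repeats_consecutively_spec : Claim_equal_group_ambiguous_repeats_consecutively := by
  intro xs _
  unfold Spec_group_ambiguous_repeats_consecutively
  have hpair : xs.foldl pvStepA (PySem.Dict.empty, ([] : List String))
      = (xs.foldl pvStep1 PySem.Dict.empty, (xs.foldl pvStep1 PySem.Dict.empty).keys) := by
    have he : (PySem.Dict.empty : PySem.Dict String (List (String × Int))).keys = [] := by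
      simp [PySem.Dict.keys_empty]
    rw [← he]
    have h2 := foldA_snd_keys xs (PySem.Dict.empty : PySem.Dict String (List (String × Int)))
    have h1 := foldA_fst xs (PySem.Dict.empty : PySem.Dict String (List (String × Int)))
      (PySem.Dict.keys (PySem.Dict.empty : PySem.Dict String (List (String × Int))))
    exact Prod.ext (by rw [h1]) (by rw [h2, h1])
  have hK : (xs.foldl pvStep1 PySem.Dict.empty).keys
      = PySem.List.dedup (xs.map fun p => collapseRepeats p.1) := by
    rw [foldA_keys]
    simp [PySem.Dict.keys_empty, PySem.Set.update_nil_left, PySem.List.dedup_eq_ofList]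
  have hnd : (xs.foldl pvStep1 PySem.Dict.empty).keys.Nodup := by
    rw [hK]; exact PySem.List.nodup_dedup _
  have hval : ∀ k ∈ (xs.foldl pvStep1 PySem.Dict.empty).keys,
      ((xs.foldl pvStep1 PySem.Dict.empty).keys.foldl
        (fun g k => g.modify k [] (fun l => PySem.List.sorted l (fun x => x.2) false))
        (xs.foldl pvStep1 PySem.Dict.empty)).getD k []
      = PySem.List.sorted (xs.filter (fun ps => collapseRepeats ps.1 == k)) (fun x => x.2) false := by
    intro k hk
    rw [sortLoop_getD _ _ hnd k hk, foldA_getD]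
    simp [PySem.Dict.getD_empty]
  have hvalB : ∀ (k : String),
      (((PySem.List.sorted xs (fun x => x.2) false).foldl pvStepB PySem.Dict.empty)).getD k []
      = PySem.List.sorted (xs.filter (fun ps => collapseRepeats ps.1 == k)) (fun x => x.2) false := by
    intro k
    rw [foldB_getD]
    simp only [PySem.Dict.getD_empty, List.nil_append]
    exact filter_sorted (fun x : String × Int => x.2) (fun p => collapseRepeats p.1 == k) xs
  simp only [group_ambiguous_repeats_consecutively, group_ambiguous_repeats_consecutively_alt, hpair]
  rw [← hK]
  apply PySem.List.foldl_congr_mem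
  intro acc k hk
  rw [hval k hk, hvalB k]
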